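-- pv_equiv track=rewrite | github.com/AITheorem/individual | src/tr/result_files/patch_and_stats.py | create_doubles
-- ===== SOURCE A (Python) =====
-- def create_doubles(n):
--     layers = list(range(n))
--     doubles_int = []
--     for first_end in range(1, n):
--         first = layers[:first_end]
--         second = layers[first_end:]
--         doubles_int.append((first, second))
--     list_of_doubles = []
--     for first, second in doubles_int:
--         z = [f"blocks.{i}.attn.hook_v" for i in first]
--         v = [f"blocks.{i}.attn.hook_q" for i in second]
--         list_of_doubles.append((z, v))
--     return list_of_doubles
-- ===== SOURCE B (Python) =====
-- def create_doubles(n):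
--     result = []
--     prefix = []
--     suffix = [f"blocks.{i}.attn.hook_q" for i in range(1, n)]
--     for k in range(1, n):
--         prefix.append(f"blocks.{k-1}.attn.hook_v")
--         result.append((list(prefix), list(suffix)))
--         if suffix:
--             suffix.pop(0)
--     return result
-- ===== Notes on version B (the rewrite author's own statement) =====
-- stated objective: alternative
-- what changed: B is a single stateful pass that maintains a growing prefix accumulator (appending one new hook_v name per split) and a shrinking suffix accumulator (popping one hook_q name per split), snapshotting both at each step, instead of A's two staged passes that build index-sublist pairs by slicing and then re-format every index of every pair. (formats only O(n) strings instead of O(n^2))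
import Mathlib
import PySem

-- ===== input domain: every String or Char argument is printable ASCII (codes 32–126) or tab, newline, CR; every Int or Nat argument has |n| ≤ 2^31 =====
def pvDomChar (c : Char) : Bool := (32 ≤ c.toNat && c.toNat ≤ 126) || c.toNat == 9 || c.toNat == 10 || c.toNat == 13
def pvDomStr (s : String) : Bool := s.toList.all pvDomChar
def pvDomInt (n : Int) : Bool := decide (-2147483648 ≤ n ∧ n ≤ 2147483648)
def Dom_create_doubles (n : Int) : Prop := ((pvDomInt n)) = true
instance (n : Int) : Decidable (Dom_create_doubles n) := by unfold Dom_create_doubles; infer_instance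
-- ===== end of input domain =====

-- B replaces A's two staged passes (slice index lists, then format each pair) by one stateful pass
-- with a growing prefix / shrinking suffix accumulator snapshotted at each split point.

-- shared f-string helpers (f"blocks.{i}.attn.hook_v" / hook_q)
def hookV (i : Int) : String := "blocks." ++ PySem.Int.toStr i ++ ".attn.hook_v"
def hookQ (i : Int) : String := "blocks." ++ PySem.Int.toStr i ++ ".attn.hook_q"

-- ===== PORT A =====
def create_doubles (n : Int) : List (List String × List String) :=
  let layers := PySem.List.pyRange 0 n 1
  let doubles_int : List (List Int × List Int) :=
    (PySem.List.pyRange 1 n 1).foldl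
      (fun acc first_end =>
        acc ++ [(PySem.List.slice layers none (some first_end),
                 PySem.List.slice layers (some first_end) none)]) []
  doubles_int.foldl
    (fun acc fs => acc ++ [(fs.1.map hookV, fs.2.map hookQ)]) []

-- ===== PORT B =====
-- loop body: prefix.append(...); result.append((list(prefix), list(suffix))); if suffix: suffix.pop(0)
def cdStep (st : List String × List String × List (List String × List String)) (k : Int) :
    List String × List String × List (List String × List String) :=
  let pfx := st.1 ++ [hookV (k - 1)]
  let res := st.2.2 ++ [(pfx, st.2.1)]
  let sfx := if st.2.1 = [] then st.2.1 else st.2.1.drop 1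
  (pfx, sfx, res)

def create_doubles_alt (n : Int) : List (List String × List String) :=
  let suffix0 := (PySem.List.pyRange 1 n 1).map hookQ
  ((PySem.List.pyRange 1 n 1).foldl cdStep ([], suffix0, [])).2.2

-- ===== PRECONDITION & SPEC =====
def Spec_create_doubles (n : Int) (out : List (List String × List String)) : Prop := out = create_doubles_alt n
instance (n : Int) (out : List (List String × List String)) : Decidable (Spec_create_doubles n out) := by unfold Spec_create_doubles; infer_instance

-- ===== CLAIM (what is proved, stated in full; the proofs are below) =====
def Claim_equal_create_doubles : Prop := ∀ (n : Int), Dom_create_doubles n → Spec_create_doubles n (create_doubles n)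

-- ===== LEMMAS AND PROOFS =====
theorem foldl_snoc_eq_map {α β : Type} (f : α → β) (l : List α) (a : List β) :
    l.foldl (fun acc x => acc ++ [f x]) a = a ++ l.map f := by
  induction l generalizing a with
  | nil => simp
  | cons x xs ih => simp [List.foldl, ih]

-- take/drop of a 0-based range at a split point k
theorem take_pyRange (n k : Int) (h0 : 0 ≤ k) (hk : k ≤ n) :
    (PySem.List.pyRange 0 n 1).take k.toNat = PySem.List.pyRange 0 k 1 := by
  rw [PySem.List.pyRange_one_append 0 k n h0 hk]
  have hl : (PySem.List.pyRange 0 k 1).length = k.toNat := by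
    simp [PySem.List.length_pyRange_one]
  rw [← hl, List.take_left]

theorem drop_pyRange (n k : Int) (h0 : 0 ≤ k) (hk : k ≤ n) :
    (PySem.List.pyRange 0 n 1).drop k.toNat = PySem.List.pyRange k n 1 := by
  rw [PySem.List.pyRange_one_append 0 k n h0 hk]
  have hl : (PySem.List.pyRange 0 k 1).length = k.toNat := by
    simp [PySem.List.length_pyRange_one]
  rw [← hl, List.drop_left]

-- invariant of B's fold: starting at split point a with prefix = v-names of 0..a-2,
-- suffix = q-names of a..n-1, it appends exactly the pairs of splits a..n-1
theorem cd_fold (m : Nat) : ∀ (n a : Int) (r : List (List String × List String)),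
    1 ≤ a → (n - a).toNat = m →
    ((PySem.List.pyRange a n 1).foldl cdStep
        ((PySem.List.pyRange 0 (a - 1) 1).map hookV,
         (PySem.List.pyRange a n 1).map hookQ, r)).2.2
      = r ++ (PySem.List.pyRange a n 1).map
          (fun k => ((PySem.List.pyRange 0 k 1).map hookV,
                     (PySem.List.pyRange k n 1).map hookQ)) := by
  induction m with
  | zero =>
    intro n a r ha hm
    have hna : n ≤ a := by omega
    rw [PySem.List.pyRange_one_eq_nil hna]
    simp
  | succ m ih =>
    intro n a r ha hm
    have han : a < n := by omega
    rw [PySem.List.pyRange_one_cons han]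
    have hpfx : (PySem.List.pyRange 0 (a - 1) 1).map hookV ++ [hookV (a - 1)]
        = (PySem.List.pyRange 0 a 1).map hookV := by
      have : PySem.List.pyRange 0 ((a - 1) + 1) 1
          = PySem.List.pyRange 0 (a - 1) 1 ++ [a - 1] := by
        exact PySem.List.pyRange_one_succ_right (by omega)
      have ha' : (a - 1) + 1 = a := by omega
      rw [ha'] at this
      rw [this, List.map_append]; rfl
    have hsfx : (a :: PySem.List.pyRange (a + 1) n 1).map hookQ
        = hookQ a :: (PySem.List.pyRange (a + 1) n 1).map hookQ := rfl
    simp only [List.foldl_cons, cdStep, hsfx]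
    simp only [List.drop_one, List.tail_cons, reduceCtorEq, if_false, hpfx]
    have hpfx' : (PySem.List.pyRange 0 a 1).map hookV
        = (PySem.List.pyRange 0 ((a + 1) - 1) 1).map hookV := by norm_num
    rw [hpfx']
    rw [ih n (a + 1) _ (by omega) (by omega)]
    rw [List.map_cons, ← hsfx, PySem.List.pyRange_one_cons han]
    simp

-- ===== VERDICT (by name: the statement is the Claim_ definition above) =====
theorem create_doubles_spec : Claim_equal_create_doubles := by
  intro n _
  unfold Spec_create_doubles create_doubles create_doubles_alt
  simp only [foldl_snoc_eq_map, List.nil_append, List.map_map]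
  have hinit : ((PySem.List.pyRange 0 (1 - 1) 1).map hookV : List String) = [] := by
    norm_num [PySem.List.pyRange_zero]
  rw [← hinit, cd_fold (n - 1).toNat n 1 [] le_rfl rfl, List.nil_append]
  apply List.map_congr_left
  intro k hk
  have hk1 : (1 : Int) ≤ k := (PySem.List.mem_pyRange_one.mp hk).1
  have hk2 : k < n := (PySem.List.mem_pyRange_one.mp hk).2
  have hk0 : (0 : Int) ≤ k := by omega
  simp only [Function.comp_apply, PySem.List.slice_to _ hk0, PySem.List.slice_from _ hk0,
    take_pyRange n k hk0 (by omega),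
    drop_pyRange n k hk0 (by omega)]
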